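-- pv_equiv track=rewrite | github.com/mooja/dailyprogrammer | challenge341easy.py | all_repeating
-- ===== SOURCE A (Python) =====
-- from collections import Counter
--
-- def all_repeating(text, minlen=2):
--     total_count = Counter()
--     substring_sizes = range(minlen, len(text))
--     for size in substring_sizes:
--         inner_count = Counter()
--         substrings = (text[i:i+size] for i in range(len(text)-size+1))
--         for substr in substrings:
--             inner_count[substr] += 1
--         for substr, n in inner_count.items():
--             if n > 1:
--                 total_count[substr] = n
--     return total_count
-- ===== SOURCE B (Python) =====
-- def all_repeating(text, minlen=2):
--     n = len(text)
--     lo = max(minlen, 1)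
--     counts = {}
--     for i in range(n):
--         for j in range(i + lo, n + 1):
--             s = text[i:j]
--             counts[s] = counts.get(s, 0) + 1
--     by_len = {}
--     for s, c in counts.items():
--         if c > 1:
--             by_len.setdefault(len(s), []).append((s, c))
--     out = {}
--     for size in range(lo, n):
--         for s, c in by_len.get(size, []):
--             out[s] = c
--     return out
-- ===== Notes on version B (the rewrite author's own statement) =====
-- stated objective: alternative
-- what changed: B counts every substring once in a single dictionary built by one double loop over start and end positions and then emits the repeated entries bucketed by length, instead of building a fresh Counter per size as A does; B also clamps the minimum length to 1.
-- intended difference: On minlen at most 0 (except the vacuous case of empty text with minlen exactly 0) A returns an extra entry keyed by the empty string, produced by its non-positive-length slices, while B returns only real substrings of length at least 1, which is the intended behaviour. — e.g. on all_repeating("aa", 0): A returns [("", 3), ("a", 2)], B returns [("a", 2)]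
import Mathlib
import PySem

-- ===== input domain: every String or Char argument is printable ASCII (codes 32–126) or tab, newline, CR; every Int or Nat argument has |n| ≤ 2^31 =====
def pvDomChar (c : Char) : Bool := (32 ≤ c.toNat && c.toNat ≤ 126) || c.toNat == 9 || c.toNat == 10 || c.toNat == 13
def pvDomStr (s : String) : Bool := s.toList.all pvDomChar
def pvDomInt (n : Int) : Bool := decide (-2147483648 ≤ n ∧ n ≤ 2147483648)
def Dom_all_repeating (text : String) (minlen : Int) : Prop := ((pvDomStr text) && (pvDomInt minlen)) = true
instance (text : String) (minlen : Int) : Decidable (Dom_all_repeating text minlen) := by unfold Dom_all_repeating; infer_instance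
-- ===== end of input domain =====

-- B counts every substring once in a single pass over start/end positions and then emits
-- the repeated ones grouped by length, instead of A's fresh Counter pass per size (alternative decomposition).

-- ===== PORT A =====
def all_repeating (text : String) (minlen : Int) : List (String × Int) :=
  let n : Int := PySem.Str.len text
  let total :=
    (PySem.List.pyRange minlen n 1).foldl (fun total size =>
      let substrings :=
        (PySem.List.pyRange 0 (n - size + 1) 1).map
          (fun i => PySem.Str.slice text (some i) (some (i + size)))
      let inner :=
        substrings.foldl (fun d s => d.modify s 0 (· + 1))
          (PySem.Dict.empty : PySem.Dict String Int)
      inner.items.foldl (fun tot p => if p.2 > 1 then tot.insert p.1 p.2 else tot) total)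
      (PySem.Dict.empty : PySem.Dict String Int)
  total.items

-- ===== PORT B =====
-- by_len.setdefault(len(s), []).append((s, c)) is ported as Dict.modify (append to the stored list), which is exact
def all_repeating_alt (text : String) (minlen : Int) : List (String × Int) :=
  let n : Int := PySem.Str.len text
  let lo : Int := max minlen 1
  let counts :=
    (PySem.List.pyRange 0 n 1).foldl (fun d i =>
      (PySem.List.pyRange (i + lo) (n + 1) 1).foldl (fun d j =>
        let s := PySem.Str.slice text (some i) (some j)
        d.insert s (d.getD s 0 + 1)) d)
      (PySem.Dict.empty : PySem.Dict String Int)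
  let by_len :=
    counts.items.foldl (fun bl p =>
      if p.2 > 1 then bl.modify (PySem.Str.len p.1) [] (fun l => l ++ [p]) else bl)
      (PySem.Dict.empty : PySem.Dict Int (List (String × Int)))
  let out :=
    (PySem.List.pyRange lo n 1).foldl (fun out size =>
      (by_len.getD size []).foldl (fun out p => out.insert p.1 p.2) out) 
      (PySem.Dict.empty : PySem.Dict String Int)
  out.items

-- ===== PRECONDITION & SPEC =====
-- On minlen at most 0 (except the vacuous case of empty text with minlen exactly 0) A iterates over
-- non-positive substring lengths, whose slices collapse to the empty string (or wrap around), so A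
-- reports an entry keyed by the empty string; B clamps the minimum length to 1 and reports only real
-- substrings, which is the intended behaviour.
def D_all_repeating (text : String) (minlen : Int) : Prop :=
  minlen ≤ 0 ∧ ¬(text = "" ∧ minlen = 0)
instance (text : String) (minlen : Int) : Decidable (D_all_repeating text minlen) := by
  unfold D_all_repeating; infer_instance

def Spec_all_repeating (text : String) (minlen : Int) (out : List (String × Int)) : Prop :=
  ¬ D_all_repeating text minlen → out = all_repeating_alt text minlen
instance (text : String) (minlen : Int) (out : List (String × Int)) : Decidable (Spec_all_repeating text minlen out) := by
  unfold Spec_all_repeating; infer_instance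

def pvDiffWitness_all_repeating : String × Int := ("aa", 0)
def pvDiffWitnessOut_all_repeating : (List (String × Int)) × (List (String × Int)) :=
  ([("", 3), ("a", 2)], [("a", 2)])

-- ===== CLAIM (what is proved, stated in full; the proofs are below) =====
def Claim_unchanged_all_repeating : Prop := ∀ (text : String) (minlen : Int), Dom_all_repeating text minlen → Spec_all_repeating text minlen (all_repeating text minlen)
def Claim_exact_all_repeating : Prop := ∀ (text : String) (minlen : Int), Dom_all_repeating text minlen → D_all_repeating text minlen → all_repeating text minlen ≠ all_repeating_alt text minlen
def Claim_changed_all_repeating : Prop := Dom_all_repeating (pvDiffWitness_all_repeating.1) (pvDiffWitness_all_repeating.2) ∧ D_all_repeating (pvDiffWitness_all_repeating.1) (pvDiffWitness_all_repeating.2) ∧ all_repeating (pvDiffWitness_all_repeating.1) (pvDiffWitness_all_repeating.2) = pvDiffWitnessOut_all_repeating.1 ∧ all_repeating_alt (pvDiffWitness_all_repeating.1) (pvDiffWitness_all_repeating.2) = pvDiffWitnessOut_all_repeating.2 ∧ pvDiffWitnessOut_all_repeating.1 ≠ pvDiffWitnessOut_all_repeating.2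

-- ===== LEMMAS AND PROOFS =====

-- substring text[i:j]
def pvSub (text : String) (i j : Int) : String := PySem.Str.slice text (some i) (some j)

-- A's per-size key stream: text[i:i+L] for i in range(n-L+1)
def pvKeysL (text : String) (L : Int) : List String :=
  (PySem.List.pyRange 0 (PySem.Str.len text - L + 1) 1).map (fun i => pvSub text i (i + L))

-- B's single key stream: text[i:j] for i in range(n), j in range(i+lo, n+1)
def pvAll (text : String) (lo : Int) : List String :=
  (PySem.List.pyRange 0 (PySem.Str.len text) 1).flatMap
    (fun i => (PySem.List.pyRange (i + lo) (PySem.Str.len text + 1) 1).map (fun j => pvSub text i j))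

-- the block of output pairs contributed by substring length L
def pvReps (text : String) (L : Int) : List (String × Int) :=
  ((PySem.Set.ofList (pvKeysL text L)).map (fun s => (s, ((pvKeysL text L).count s : Int)))).filter
    (fun p => decide (p.2 > 1))

-- B's block for length L, before it is identified with pvReps
def pvRepsB (text : String) (lo L : Int) : List (String × Int) :=
  (PySem.Dict.counter (pvAll text lo)).items.filter
    (fun p => decide (PySem.Str.len p.1 = L ∧ p.2 > 1))

theorem pv_len_nonneg (text : String) : 0 ≤ PySem.Str.len text := by
  rw [PySem.Str.len_eq]; positivity

theorem pv_len_sub (text : String) (i j : Int) (h0 : 0 ≤ i) (hij : i ≤ j)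
    (hn : j ≤ PySem.Str.len text) : PySem.Str.len (pvSub text i j) = j - i := by
  rw [PySem.Str.len_eq] at hn
  rw [pvSub, PySem.Str.len_eq, PySem.Str.toList_slice, PySem.Chars.slice_eq_listSlice,
    ← Int.toNat_of_nonneg h0, ← Int.toNat_of_nonneg (le_trans h0 hij),
    PySem.List.length_slice, PySem.List.clampIdx_natCast, PySem.List.clampIdx_natCast]
  omega

theorem pv_flatMap_congr {α β : Type} (l : List α) (f g : α → List β)
    (h : ∀ x ∈ l, f x = g x) : l.flatMap f = l.flatMap g := by
  induction l with
  | nil => rfl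
  | cons x xs ih =>
    simp only [List.flatMap_cons]
    rw [h x (by simp), ih (fun y hy => h y (by simp [hy]))]

theorem pv_mem_keysL (text : String) (L : Int) (h0 : 0 ≤ L) (s : String)
    (hs : s ∈ pvKeysL text L) : PySem.Str.len s = L := by
  unfold pvKeysL at hs
  simp only [List.mem_map] at hs
  obtain ⟨i, hi, rfl⟩ := hs
  rw [PySem.List.mem_pyRange_one] at hi
  have := pv_len_sub text i (i + L) hi.1 (by omega) (by omega)
  omega

theorem pv_filter_map_pair {α : Type} (S : List α) (v : α → Int) (p : α × Int → Bool) :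
    (S.map (fun s => (s, v s))).filter p
      = (S.filter (fun s => p (s, v s))).map (fun s => (s, v s)) := by
  rw [List.filter_map]
  rfl

theorem pv_filter_add {α : Type} [BEq α] [LawfulBEq α] (s : PySem.Set α) (x : α) (p : α → Bool) :
    (PySem.Set.add s x).filter p
      = if p x = true then PySem.Set.add (s.filter p) x else s.filter p := by
  rw [PySem.Set.add_eq_ite, PySem.Set.add_eq_ite]
  by_cases hm : x ∈ s
  · rw [if_pos hm]
    by_cases hp : p x = true
    · rw [if_pos hp, if_pos (List.mem_filter.mpr ⟨hm, hp⟩)]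
    · rw [if_neg hp]
  · rw [if_neg hm, List.filter_append]
    by_cases hp : p x = true
    · rw [if_pos hp, if_neg (fun h => hm (List.mem_filter.mp h).1)]
      simp [hp]
    · have hpf : p x = false := by simpa using hp
      rw [if_neg hp]
      simp [hpf]

theorem pv_filter_foldl_add {α : Type} [BEq α] [LawfulBEq α] (xs : List α) (p : α → Bool)
    (s : PySem.Set α) :
    (xs.foldl PySem.Set.add s).filter p = (xs.filter p).foldl PySem.Set.add (s.filter p) := by
  induction xs generalizing s with
  | nil => rfl
  | cons x xs ih =>
    simp only [List.foldl_cons, List.filter_cons]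
    rw [ih, pv_filter_add]
    by_cases hp : p x = true
    · rw [if_pos hp, if_pos hp, List.foldl_cons]
    · rw [if_neg hp, if_neg hp]

theorem pv_filter_ofList {α : Type} [BEq α] [LawfulBEq α] (xs : List α) (p : α → Bool) :
    (PySem.Set.ofList xs).filter p = PySem.Set.ofList (xs.filter p) := by
  rw [PySem.Set.ofList_eq_foldl, PySem.Set.ofList_eq_foldl, pv_filter_foldl_add]
  rfl

-- B's key stream filtered to one length L is exactly A's per-size key stream
theorem pv_filter_all (text : String) (lo L : Int) (hlo : 1 ≤ lo) (hloL : lo ≤ L)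
    (hLn : L < PySem.Str.len text) :
    (pvAll text lo).filter (fun s => decide (PySem.Str.len s = L)) = pvKeysL text L := by
  unfold pvAll pvKeysL
  rw [List.filter_flatMap]
  rw [pv_flatMap_congr (PySem.List.pyRange 0 (PySem.Str.len text) 1) _
    (fun i => if i ≤ PySem.Str.len text - L then [pvSub text i (i + L)] else []) ?hbody]
  case hbody =>
    intro i hi
    show _ = if i ≤ PySem.Str.len text - L then [pvSub text i (i + L)] else []
    rw [PySem.List.mem_pyRange_one] at hi
    rw [List.filter_map]
    rw [List.filter_congr (q := fun j => j == i + L) ?hpred]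
    case hpred =>
      intro j hj
      rw [PySem.List.mem_pyRange_one] at hj
      simp only [Function.comp]
      rw [pv_len_sub text i j hi.1 (by omega) (by omega)]
      rw [show (decide (j - i = L)) = (decide (j = i + L)) from decide_eq_decide.mpr (by omega)]
      by_cases h : j = i + L
      · simp [h]
      · simp [h]
    rw [List.filter_beq]
    by_cases hmem : i + L ∈ PySem.List.pyRange (i + lo) (PySem.Str.len text + 1) 1
    · have hle : i ≤ PySem.Str.len text - L := by
        rw [PySem.List.mem_pyRange_one] at hmem; omega
      rw [List.count_eq_one_of_mem (PySem.List.nodup_pyRange_one _ _) hmem, if_pos hle]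
      rfl
    · have hle : ¬ i ≤ PySem.Str.len text - L := by
        intro hle
        exact hmem (PySem.List.mem_pyRange_one.mpr ⟨by omega, by omega⟩)
      rw [List.count_eq_zero_of_not_mem hmem, if_neg hle]
      rfl
  rw [PySem.List.pyRange_one_append 0 (PySem.Str.len text - L + 1) (PySem.Str.len text)
    (by omega) (by omega)]
  rw [List.flatMap_append]
  rw [pv_flatMap_congr (PySem.List.pyRange (PySem.Str.len text - L + 1) (PySem.Str.len text) 1) _
    (fun _ => []) (by
      intro i hi
      show (if i ≤ PySem.Str.len text - L then [pvSub text i (i + L)] else []) = []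
      rw [PySem.List.mem_pyRange_one] at hi
      rw [if_neg (show ¬ i ≤ PySem.Str.len text - L by omega)])]
  rw [pv_flatMap_congr (PySem.List.pyRange 0 (PySem.Str.len text - L + 1) 1) _
    (fun i => [pvSub text i (i + L)]) (by
      intro i hi
      show (if i ≤ PySem.Str.len text - L then [pvSub text i (i + L)] else []) = [pvSub text i (i + L)]
      rw [PySem.List.mem_pyRange_one] at hi
      rw [if_pos (show i ≤ PySem.Str.len text - L by omega)])]
  have h2 : ∀ l : List Int, (l.flatMap (fun _ : Int => ([] : List String))) = [] := fun l => by
    induction l with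
    | nil => rfl
    | cons a t ih => simpa using ih
  have h3 : ∀ (l : List Int) (f : Int → String), l.flatMap (fun i => [f i]) = l.map f := fun l f => by
    induction l with
    | nil => rfl
    | cons a t ih => simp [ih]
  rw [h2, List.append_nil]
  exact h3 _ _

-- generic block lemma: an outer loop whose body inserts blocks of fresh keys appends the blocks
theorem pv_blocks (body : PySem.Dict String Int → Int → PySem.Dict String Int)
    (F : Int → List (String × Int)) (sizes : List Int) (d : PySem.Dict String Int)
    (hbody : ∀ t L, L ∈ sizes → body t L = (F L).foldl (fun t p => t.insert p.1 p.2) t)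
    (hnd : d.keys.Nodup) (hsn : sizes.Nodup)
    (hlen : ∀ L ∈ sizes, ∀ p ∈ F L, PySem.Str.len p.1 = L)
    (hFnd : ∀ L ∈ sizes, ((F L).map Prod.fst).Nodup)
    (hfresh : ∀ L ∈ sizes, ∀ p ∈ F L, d.contains p.1 = false) :
    (sizes.foldl body d).items = d.items ++ sizes.flatMap F := by
  induction sizes generalizing d with
  | nil => simp
  | cons L rest ih =>
    simp only [List.foldl_cons, List.flatMap_cons]
    rw [hbody d L (by simp)]
    have hstep : ((F L).foldl (fun t p => t.insert p.1 p.2) d).items = d.items ++ F L := by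
      have h := PySem.Dict.items_foldl_insert_fresh (F L) Prod.fst Prod.snd d
        (hfresh L (by simp)) (hFnd L (by simp))
      simpa using h
    have hkeys' : ((F L).foldl (fun t p => t.insert p.1 p.2) d).keys
        = d.keys ++ (F L).map Prod.fst := by
      simp only [PySem.Dict.keys, hstep, List.map_append]
    rw [ih ((F L).foldl (fun t p => t.insert p.1 p.2) d)
      (fun t L' hL' => hbody t L' (by simp [hL']))
      (by
        rw [hkeys']
        refine List.Nodup.append hnd (hFnd L (by simp)) ?_
        intro a ha hb
        simp only [List.mem_map] at hb
        obtain ⟨q, hq, hq1⟩ := hb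
        have hc := hfresh L (by simp) q hq
        rw [PySem.Dict.contains_eq_decide_mem_keys] at hc
        simp only [decide_eq_false_iff_not] at hc
        exact hc (hq1 ▸ ha))
      (List.nodup_cons.mp hsn).2
      (fun L' hL' p hp => hlen L' (by simp [hL']) p hp)
      (fun L' hL' => hFnd L' (by simp [hL']))
      (by
        intro L' hL' p hp
        rw [PySem.Dict.contains_eq_decide_mem_keys, hkeys']
        simp only [decide_eq_false_iff_not, List.mem_append]
        rintro (h | h)
        · have hc := hfresh L' (by simp [hL']) p hp
          rw [PySem.Dict.contains_eq_decide_mem_keys] at hc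
          simp only [decide_eq_false_iff_not] at hc
          exact hc h
        · simp only [List.mem_map] at h
          obtain ⟨q, hq, hq1⟩ := h
          have hl1 := hlen L (by simp) q hq
          have hl2 := hlen L' (by simp [hL']) p hp
          have hne : L ≠ L' := by
            intro h; subst h; exact (List.nodup_cons.mp hsn).1 hL'
          rw [hq1] at hl1; omega)]
    rw [hstep, List.append_assoc]

theorem pv_mem_reps (text : String) (L : Int) (h0 : 0 ≤ L) (p : String × Int)
    (hp : p ∈ pvReps text L) : PySem.Str.len p.1 = L := by
  unfold pvReps at hp
  have h := List.mem_of_mem_filter hp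
  simp only [List.mem_map] at h
  obtain ⟨s, hs, rfl⟩ := h
  rw [PySem.Set.mem_ofList] at hs
  exact pv_mem_keysL text L h0 s hs

theorem pv_reps_keys_nodup (text : String) (L : Int) :
    ((pvReps text L).map Prod.fst).Nodup := by
  unfold pvReps
  rw [pv_filter_map_pair, List.map_map]
  rw [show (Prod.fst ∘ fun s : String => (s, ((pvKeysL text L).count s : Int))) = id from rfl,
    List.map_id]
  exact List.Nodup.filter _ (PySem.Set.nodup_ofList _)

theorem pv_mem_repsB (text : String) (lo L : Int) (p : String × Int)
    (hp : p ∈ pvRepsB text lo L) : PySem.Str.len p.1 = L := by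
  unfold pvRepsB at hp
  have h := List.of_mem_filter hp
  simp only [decide_eq_true_eq] at h
  exact h.1

theorem pv_repsB_keys_nodup (text : String) (lo L : Int) :
    ((pvRepsB text lo L).map Prod.fst).Nodup := by
  unfold pvRepsB
  rw [PySem.Dict.items_counter, pv_filter_map_pair, List.map_map]
  rw [show (Prod.fst ∘ fun s : String => (s, ((pvAll text lo).count s : Int))) = id from rfl,
    List.map_id]
  exact List.Nodup.filter _ (PySem.Set.nodup_ofList _)

-- A computes exactly the concatenation of the per-size blocks
theorem pv_A_eq (text : String) (minlen : Int) (h1 : 1 ≤ minlen) :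
    all_repeating text minlen
      = (PySem.List.pyRange minlen (PySem.Str.len text) 1).flatMap (pvReps text) := by
  simp only [all_repeating]
  refine (pv_blocks _ (pvReps text) _ PySem.Dict.empty
    (fun t size _ => ?_)
    PySem.Dict.nodup_keys_empty
    (PySem.List.nodup_pyRange_one _ _)
    (fun L hL p hp => pv_mem_reps text L
      (by have := PySem.List.mem_pyRange_one.mp hL; omega) p hp)
    (fun L _ => pv_reps_keys_nodup text L)
    (fun L _ p _ => PySem.Dict.contains_empty _)).trans ?_
  · rw [← PySem.Dict.counter_eq_foldl,
      PySem.List.foldl_ite_eq_foldl_filter (fun p : String × Int => p.2 > 1)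
        (fun (t : PySem.Dict String Int) (p : String × Int) => t.insert p.1 p.2),
      PySem.Dict.items_counter]
    rfl
  · rfl

theorem pv_foldl_key (l : List (String × Int)) (init : PySem.Dict Int (List (String × Int))) :
    l.foldl (fun bl p => bl.modify (PySem.Str.len p.1) [] (fun t => t ++ [p])) init
      = (l.map (fun p => (PySem.Str.len p.1, p))).foldl
          (fun bl q => bl.modify q.1 [] (fun t => t ++ [q.2])) init := by
  induction l generalizing init with
  | nil => rfl
  | cons a t ih =>
    simp only [List.foldl_cons, List.map_cons]
    exact ih _

-- B computes exactly the concatenation of its per-length buckets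
theorem pv_B_eq (text : String) (minlen : Int) :
    all_repeating_alt text minlen
      = (PySem.List.pyRange (max minlen 1) (PySem.Str.len text) 1).flatMap
          (pvRepsB text (max minlen 1)) := by
  simp only [all_repeating_alt]
  have hcounts : (PySem.List.pyRange 0 (PySem.Str.len text) 1).foldl
      (fun d i => (PySem.List.pyRange (i + max minlen 1) (PySem.Str.len text + 1) 1).foldl
        (fun d j => d.insert (PySem.Str.slice text (some i) (some j))
          ((d.getD (PySem.Str.slice text (some i) (some j)) 0) + 1)) d)
      (PySem.Dict.empty : PySem.Dict String Int) = PySem.Dict.counter (pvAll text (max minlen 1)) := by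
    rw [← PySem.Dict.foldl_insert_getD_add_one_eq_counter, pvAll]
    simp only [List.flatMap, List.foldl_flatten, List.foldl_map, pvSub]
  rw [hcounts]
  have hBL : ∀ L : Int,
      (((PySem.Dict.counter (pvAll text (max minlen 1))).items.foldl (fun bl p =>
          if p.2 > 1 then bl.modify (PySem.Str.len p.1) [] (fun l => l ++ [p]) else bl)
          (PySem.Dict.empty : PySem.Dict Int (List (String × Int)))).getD L [])
        = pvRepsB text (max minlen 1) L := by
    intro L
    rw [PySem.List.foldl_ite_eq_foldl_filter (fun p : String × Int => p.2 > 1)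
      (fun (bl : PySem.Dict Int (List (String × Int))) (p : String × Int) =>
        bl.modify (PySem.Str.len p.1) [] (fun l => l ++ [p]))]
    have e1 : ((PySem.Dict.counter (pvAll text (max minlen 1))).items.filter
          (fun p => decide (p.2 > 1))).foldl
          (fun bl p => bl.modify (PySem.Str.len p.1) [] (fun l => l ++ [p]))
          (PySem.Dict.empty : PySem.Dict Int (List (String × Int)))
        = (((PySem.Dict.counter (pvAll text (max minlen 1))).items.filter
            (fun p => decide (p.2 > 1))).map (fun p => (PySem.Str.len p.1, p))).foldl
            (fun bl q => bl.modify q.1 [] (fun l => l ++ [q.2]))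
            (PySem.Dict.empty : PySem.Dict Int (List (String × Int))) :=
      pv_foldl_key _ _
    rw [e1, PySem.Dict.getD_foldl_modify_append, List.filter_map, List.map_map]
    have hid : ((fun q : Int × (String × Int) => q.2)
        ∘ fun p : String × Int => (PySem.Str.len p.1, p)) = id := rfl
    rw [hid, List.map_id]
    have hemp : (PySem.Dict.empty : PySem.Dict Int (List (String × Int))).getD L [] = [] := rfl
    rw [hemp, List.nil_append, List.filter_filter]
    unfold pvRepsB
    have hbe : ∀ (a b : Int), (a == b) = decide (a = b) := fun a b => by
      by_cases h : a = b <;> simp [h]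
    refine List.filter_congr (fun p _ => ?_)
    show ((PySem.Str.len p.1 == L) && decide (p.2 > 1))
      = decide (PySem.Str.len p.1 = L ∧ p.2 > 1)
    rw [hbe]
    by_cases ha : PySem.Str.len p.1 = L <;> by_cases hb : p.2 > 1 <;> simp [ha, hb]
  refine (pv_blocks _ (pvRepsB text (max minlen 1)) _ PySem.Dict.empty
    (fun t size _ => ?_)
    PySem.Dict.nodup_keys_empty
    (PySem.List.nodup_pyRange_one _ _)
    (fun L _ p hp => pv_mem_repsB text (max minlen 1) L p hp)
    (fun L _ => pv_repsB_keys_nodup text (max minlen 1) L)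
    (fun L _ p _ => PySem.Dict.contains_empty _)).trans ?_
  · show ((_ : PySem.Dict Int (List (String × Int))).getD size []).foldl
      (fun out p => out.insert p.1 p.2) t = _
    rw [hBL size]
  · rfl

theorem pv_count_keysL (text : String) (lo L : Int) (hlo : 1 ≤ lo) (h1 : lo ≤ L)
    (h2 : L < PySem.Str.len text) (s : String) (hs : s ∈ pvKeysL text L) :
    (pvAll text lo).count s = (pvKeysL text L).count s := by
  have hlen := pv_mem_keysL text L (by omega) s hs
  rw [← pv_filter_all text lo L hlo h1 h2]
  rw [List.count_filter (by simp only [decide_eq_true_eq]; exact hlen)]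

-- the two blocks agree for every admissible length
theorem pv_reps_eq (text : String) (lo L : Int) (hlo : 1 ≤ lo) (h1 : lo ≤ L)
    (h2 : L < PySem.Str.len text) :
    pvRepsB text lo L = pvReps text L := by
  unfold pvRepsB pvReps
  rw [PySem.Dict.items_counter, pv_filter_map_pair, pv_filter_map_pair]
  rw [List.filter_congr (q := fun s =>
    decide (((pvAll text lo).count s : Int) > 1) && decide (PySem.Str.len s = L))
    (fun s _ => by
      by_cases ha : PySem.Str.len s = L <;>
        by_cases hb : ((pvAll text lo).count s : Int) > 1 <;> simp [ha, hb])]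
  rw [← List.filter_filter]
  rw [pv_filter_ofList, pv_filter_all text lo L hlo h1 h2]
  rw [List.filter_congr (q := fun s => decide (((pvKeysL text L).count s : Int) > 1))
    (fun s hs => by
      rw [PySem.Set.mem_ofList] at hs
      rw [pv_count_keysL text lo L hlo h1 h2 s hs])]
  refine List.map_congr_left ?_
  intro s hs
  have hsK : s ∈ pvKeysL text L := by
    have h := List.mem_of_mem_filter hs
    rw [PySem.Set.mem_ofList] at h
    exact h
  rw [pv_count_keysL text lo L hlo h1 h2 s hsK]


-- ===== tightness: inside D_ the two programs always differ =====

-- A's outer-loop body, named so the fold can be reasoned about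
def pvAbody (text : String) (total : PySem.Dict String Int) (size : Int) : PySem.Dict String Int :=
  (((PySem.List.pyRange 0 (PySem.Str.len text - size + 1) 1).map
      (fun i => PySem.Str.slice text (some i) (some (i + size)))).foldl
      (fun d s => d.modify s 0 (· + 1)) (PySem.Dict.empty : PySem.Dict String Int)).items.foldl
    (fun tot p => if p.2 > 1 then tot.insert p.1 p.2 else tot) total

theorem pv_A_unfold (text : String) (minlen : Int) :
    all_repeating text minlen
      = ((PySem.List.pyRange minlen (PySem.Str.len text) 1).foldl (pvAbody text)
          PySem.Dict.empty).items := rfl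

theorem pv_str_nil (s : String) (h : s.toList = []) : s = "" :=
  String.toList_inj.mp (by simpa using h)

theorem pv_slice_self (text : String) (i : Int) :
    PySem.Str.slice text (some i) (some i) = "" := by
  apply pv_str_nil
  rw [PySem.Str.toList_slice, PySem.Chars.slice_eq_listSlice]
  apply List.eq_nil_of_length_eq_zero
  rw [PySem.List.length_slice]
  omega

theorem pv_slice_empty (i j : Int) : PySem.Str.slice "" (some i) (some j) = "" := by
  apply pv_str_nil
  rw [PySem.Str.toList_slice, PySem.Chars.slice_eq_listSlice]
  apply List.eq_nil_of_length_eq_zero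
  rw [PySem.List.length_slice]
  have h1 := PySem.List.clampIdx_le (String.toList "").length j
  have h2 := PySem.List.clampIdx_le (String.toList "").length i
  have h0 : (String.toList "").length = 0 := rfl
  omega

theorem pv_inner_mono (l : List (String × Int)) (t : PySem.Dict String Int) (k : String)
    (h : k ∈ t.keys) :
    k ∈ (l.foldl (fun tot p => if p.2 > 1 then tot.insert p.1 p.2 else tot) t).keys := by
  induction l generalizing t with
  | nil => exact h
  | cons p ps ih =>
    rw [List.foldl_cons]
    refine ih _ ?_
    by_cases hp : p.2 > 1
    · rw [if_pos hp]
      exact (PySem.Dict.mem_keys_insert _ _ _ _).mpr (Or.inr h)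
    · rwa [if_neg hp]

theorem pv_outer_mono (text : String) (sizes : List Int) (t : PySem.Dict String Int) (k : String)
    (h : k ∈ t.keys) : k ∈ (sizes.foldl (pvAbody text) t).keys := by
  induction sizes generalizing t with
  | nil => exact h
  | cons s rest ih =>
    rw [List.foldl_cons]
    exact ih _ (pv_inner_mono _ _ _ h)

theorem pv_ofList_replicate (m : Nat) (hm : m ≠ 0) :
    PySem.Set.ofList (List.replicate m ("" : String)) = [""] := by
  rw [PySem.Set.ofList_eq_foldl]
  obtain ⟨k, rfl⟩ : ∃ k, m = k + 1 := ⟨m - 1, by omega⟩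
  rw [List.replicate_succ, List.foldl_cons]
  have hadd : PySem.Set.add ([] : PySem.Set String) "" = [""] := by
    rw [PySem.Set.add_eq_ite, if_neg (by simp)]
    rfl
  rw [hadd]
  suffices h : ∀ k2 : Nat, List.foldl PySem.Set.add [""] (List.replicate k2 "") = [""] from h k
  intro k2
  induction k2 with
  | zero => rfl
  | succ k3 ih =>
    rw [List.replicate_succ, List.foldl_cons, PySem.Set.add_eq_ite, if_pos (by simp)]
    exact ih

theorem pv_step_empty (text : String) (size : Int) (t : PySem.Dict String Int)
    (hall : ∀ i : Int, PySem.Str.slice text (some i) (some (i + size)) = "")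
    (h2 : 2 ≤ PySem.Str.len text - size + 1) :
    "" ∈ (pvAbody text t size).keys := by
  unfold pvAbody
  rw [← PySem.Dict.counter_eq_foldl]
  have hconst : ∀ (l : List Int), l.map (fun _ => ("" : String)) = List.replicate l.length "" := by
    intro l
    induction l with
    | nil => rfl
    | cons a tl ih => simp [ih, List.replicate_succ]
  have hm : (PySem.List.pyRange 0 (PySem.Str.len text - size + 1) 1).map
      (fun i => PySem.Str.slice text (some i) (some (i + size)))
      = List.replicate ((PySem.Str.len text - size + 1).toNat) ("" : String) := by
    rw [List.map_congr_left (fun i _ => hall i), hconst, PySem.List.length_pyRange_one]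
    congr 1
    omega
  rw [hm]
  have hitems : (PySem.Dict.counter
      (List.replicate ((PySem.Str.len text - size + 1).toNat) ("" : String))).items
      = [("", ((PySem.Str.len text - size + 1).toNat : Int))] := by
    rw [PySem.Dict.items_counter, pv_ofList_replicate _ (by omega)]
    simp
  rw [hitems]
  simp only [List.foldl_cons, List.foldl_nil]
  rw [if_pos (show ((PySem.Str.len text - size + 1).toNat : Int) > 1 by omega)]
  exact (PySem.Dict.mem_keys_insert _ _ _ _).mpr (Or.inl rfl)

theorem pv_A_mem_empty (text : String) (minlen : Int)
    (hD : minlen ≤ 0 ∧ ¬(text = "" ∧ minlen = 0)) :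
    ∃ v : Int, ("", v) ∈ all_repeating text minlen := by
  have hkey : "" ∈ ((PySem.List.pyRange minlen (PySem.Str.len text) 1).foldl (pvAbody text)
      PySem.Dict.empty).keys := by
    by_cases hn : 0 < PySem.Str.len text
    · rw [PySem.List.pyRange_one_append minlen 0 (PySem.Str.len text) hD.1 (by omega),
        List.foldl_append, PySem.List.pyRange_one_cons hn, List.foldl_cons]
      refine pv_outer_mono text _ _ _ ?_
      refine pv_step_empty text 0 _ (fun i => ?_) (by omega)
      rw [show i + (0 : Int) = i from add_zero i]
      exact pv_slice_self text i
    · have hn0 : PySem.Str.len text = 0 := by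
        have := pv_len_nonneg text
        omega
      have htext : text = "" := by
        apply pv_str_nil
        rw [PySem.Str.len_eq] at hn0
        exact List.eq_nil_of_length_eq_zero (by omega)
      have hm : minlen ≤ -1 := by
        rcases Decidable.em (minlen = 0) with h | h
        · exact absurd ⟨htext, h⟩ hD.2
        · omega
      rw [hn0, PySem.List.pyRange_one_cons (show minlen < 0 by omega), List.foldl_cons]
      refine pv_outer_mono text _ _ _ ?_
      refine pv_step_empty text minlen _ (fun i => ?_) (by omega)
      rw [htext]
      exact pv_slice_empty i (i + minlen)
  rw [pv_A_unfold text minlen]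
  simp only [PySem.Dict.keys] at hkey
  rw [List.mem_map] at hkey
  obtain ⟨p, hp, hfst⟩ := hkey
  exact ⟨p.2, by rwa [show ("", p.2) = p from Prod.ext hfst.symm rfl]⟩

theorem pv_alt_no_empty (text : String) (minlen : Int) (v : Int) :
    ("", v) ∉ all_repeating_alt text minlen := by
  rw [pv_B_eq]
  intro hv
  rw [List.mem_flatMap] at hv
  obtain ⟨L, hL, hp⟩ := hv
  have h1 := pv_mem_repsB text (max minlen 1) L ("", v) hp
  have h1' : (0 : Int) = L := by simpa using h1
  have h2 := (PySem.List.mem_pyRange_one.mp hL).1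
  have h3 := le_max_right minlen 1
  omega

-- ===== VERDICT (by name: the statement is the Claim_ definition above) =====
theorem all_repeating_spec : Claim_unchanged_all_repeating := by
  unfold Claim_unchanged_all_repeating Spec_all_repeating
  intro text minlen _ hD
  by_cases h1 : 1 ≤ minlen
  · rw [pv_A_eq text minlen h1, pv_B_eq text minlen, max_eq_left h1]
    refine pv_flatMap_congr _ _ _ (fun L hL => ?_)
    have h := PySem.List.mem_pyRange_one.mp hL
    exact (pv_reps_eq text minlen L h1 h.1 h.2).symm
  · rcases Decidable.em (text = "" ∧ minlen = 0) with h | h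
    · obtain ⟨ht, hm⟩ := h
      subst ht; subst hm
      decide
    · exact absurd ⟨by omega, h⟩ hD

theorem all_repeating_changed : Claim_changed_all_repeating := by
  unfold Claim_changed_all_repeating; decide

theorem all_repeating_tight : Claim_exact_all_repeating := by
  unfold Claim_exact_all_repeating D_all_repeating
  intro text minlen _ hD heq
  obtain ⟨v, hv⟩ := pv_A_mem_empty text minlen hD
  rw [heq] at hv
  exact pv_alt_no_empty text minlen v hv
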